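-- pv_equiv track=rewrite | github.com/intelliswarm-ai/mail-pilot | src/phishing_detector.py | _has_poor_grammar
-- ===== SOURCE A (Python) =====
-- def _has_poor_grammar(text: str) -> bool:
--     """Simple check for poor grammar/spelling"""
--     # Count consecutive uppercase words
--     words = text.split()
--     consecutive_upper = 0
--     max_consecutive = 0
--
--     for word in words:
--         if word.isupper() and len(word) > 2:
--             consecutive_upper += 1
--             max_consecutive = max(max_consecutive, consecutive_upper)
--         else:
--             consecutive_upper = 0
--
--     # Multiple words in all caps suggest poor formatting
--     return max_consecutive >= 3
-- ===== SOURCE B (Python) =====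
-- def _has_poor_grammar(text: str) -> bool:
--     """Simple check for poor grammar/spelling"""
--     words = text.split()
--     flags = [w.isupper() and len(w) > 2 for w in words]
--     # a run of 3+ flagged words exists iff some window of 3 consecutive flags is all True
--     return any(flags[i] and flags[i + 1] and flags[i + 2] for i in range(len(flags) - 2))
-- ===== Notes on version B (the rewrite author's own statement) =====
-- stated objective: simpler
-- what changed: Replaces the running-counter/max state machine with a per-word flag list and a sliding 3-window existence test (a run of length >= 3 exists iff three consecutive flags are all true).
import Mathlib
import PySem

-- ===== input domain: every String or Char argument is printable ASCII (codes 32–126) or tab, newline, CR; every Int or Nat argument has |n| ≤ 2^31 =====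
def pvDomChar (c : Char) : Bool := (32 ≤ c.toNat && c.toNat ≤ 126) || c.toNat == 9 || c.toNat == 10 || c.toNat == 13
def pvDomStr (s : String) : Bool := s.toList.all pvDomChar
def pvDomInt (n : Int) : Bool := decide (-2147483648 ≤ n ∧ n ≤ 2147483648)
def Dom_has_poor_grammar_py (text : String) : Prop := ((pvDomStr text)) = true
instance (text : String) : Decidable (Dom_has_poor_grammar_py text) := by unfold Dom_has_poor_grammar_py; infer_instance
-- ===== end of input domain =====

-- B replaces A's running-counter/max state machine by a flag list plus a sliding
-- 3-window existence test; same O(n) cost, simpler decomposition (objective: simpler).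

-- w.isupper(): at least one cased character and no lowercase one; on the printable-ASCII
-- domain the cased characters are exactly the letters, so this is exact there.
def pyIsupper (w : String) : Bool :=
  w.toList.any PySem.Chars.isupper && !(w.toList.any PySem.Chars.islower)

-- the loop predicate shared verbatim by A and B: word.isupper() and len(word) > 2
def wordFlag (w : String) : Bool := pyIsupper w && decide (PySem.Str.len w > 2)

-- ===== PORT A =====
def has_poor_grammar_py (text : String) : Bool :=
  let words := PySem.Str.split₀ text
  let st := words.foldl
    (fun (st : Int × Int) w =>
      if wordFlag w then (st.1 + 1, max st.2 (st.1 + 1)) else (0, st.2))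
    (0, 0)
  decide (st.2 ≥ 3)

-- ===== PORT B =====
def has_poor_grammar_py_alt (text : String) : Bool :=
  let flags := (PySem.Str.split₀ text).map wordFlag
  (List.range (flags.length - 2)).any (fun i =>
    flags.getD i false && flags.getD (i + 1) false && flags.getD (i + 2) false)

-- ===== PRECONDITION & SPEC =====
def Spec_has_poor_grammar_py (text : String) (out : Bool) : Prop := out = has_poor_grammar_py_alt text
instance (text : String) (out : Bool) : Decidable (Spec_has_poor_grammar_py text out) := by unfold Spec_has_poor_grammar_py; infer_instance

-- ===== CLAIM (what is proved, stated in full; the proofs are below) =====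
def Claim_equal_has_poor_grammar_py : Prop := ∀ (text : String), Dom_has_poor_grammar_py text → Spec_has_poor_grammar_py text (has_poor_grammar_py text)

-- ===== LEMMAS AND PROOFS =====

-- B's window test as a structural recursion on the flag list
def win3 : List Bool → Bool
  | a :: b :: c :: t => (a && b && c) || win3 (b :: c :: t)
  | _ => false

-- length of the leading run of true flags
def lead (fs : List Bool) : Nat := (fs.takeWhile (fun b => b)).length

lemma win3_true_cons (fs : List Bool) :
    win3 (true :: fs) = (decide (2 ≤ lead fs) || win3 fs) := by
  match fs with
  | [] => simp [win3, lead]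
  | [x] => cases x <;> simp [win3, lead, List.takeWhile]
  | x :: y :: t =>
      cases x <;> cases y <;> simp [win3, lead, List.takeWhile]

lemma win3_false_cons (fs : List Bool) : win3 (false :: fs) = win3 fs := by
  match fs with
  | [] => simp [win3]
  | [x] => simp [win3]
  | x :: y :: t => simp [win3]

lemma lead_win3 (fs : List Bool) (h : 3 ≤ lead fs) : win3 fs = true := by
  match fs with
  | [] => simp [lead] at h
  | [x] => cases x <;> simp [lead, List.takeWhile] at h
  | [x, y] => cases x <;> cases y <;> simp [lead, List.takeWhile] at h
  | x :: y :: z :: t =>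
      cases x <;> cases y <;> cases z <;>
        simp_all [lead, List.takeWhile, win3]

-- A's loop body, abstracted over the flag of the current word
def stepA (st : Int × Int) (b : Bool) : Int × Int :=
  if b then (st.1 + 1, max st.2 (st.1 + 1)) else (0, st.2)

lemma stepA_true (st : Int × Int) : stepA st true = (st.1 + 1, max st.2 (st.1 + 1)) := rfl

lemma stepA_false (st : Int × Int) : stepA st false = (0, st.2) := rfl

lemma loopA_mono (fs : List Bool) : ∀ (c m : Int), m ≤ (fs.foldl stepA (c, m)).2 := by
  induction fs with
  | nil => intro c m; simp
  | cons b t ih =>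
      intro c m
      cases b with
      | true =>
          simp only [List.foldl_cons, stepA_true]
          exact le_trans (le_max_left m (c + 1)) (ih (c + 1) (max m (c + 1)))
      | false =>
          simpa [stepA_false] using ih 0 m

-- invariant of A's state machine: c = current run, m = best so far
lemma loopA_key (fs : List Bool) : ∀ (c m : Int), 0 ≤ c → c ≤ 2 →
    ((fs.foldl stepA (c, m)).2 ≥ 3 ↔ m ≥ 3 ∨ c + (lead fs : Int) ≥ 3 ∨ win3 fs = true) := by
  induction fs with
  | nil =>
      intro c m hc0 hc2
      simp only [List.foldl_nil, lead, List.takeWhile, win3, List.length_nil,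
        Nat.cast_zero, add_zero]
      constructor
      · exact fun h => Or.inl h
      · rintro (h | h | h)
        · exact h
        · omega
        · exact absurd h (by simp)
  | cons b t ih =>
      intro c m hc0 hc2
      cases b with
      | false =>
          rw [List.foldl_cons, stepA_false]
          rw [ih 0 m le_rfl (by norm_num), win3_false_cons]
          have hlead : lead (false :: t) = 0 := by simp [lead, List.takeWhile]
          rw [hlead]
          constructor
          · rintro (hm | hl | hw)
            · exact Or.inl hm
            · have : 3 ≤ lead t := by exact_mod_cast (by omega : (3 : Int) ≤ (lead t : Int))
              exact Or.inr (Or.inr (lead_win3 t this))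
            · exact Or.inr (Or.inr hw)
          · rintro (hm | hc' | hw)
            · exact Or.inl hm
            · exact absurd hc' (by push_cast; omega)
            · exact Or.inr (Or.inr hw)
      | true =>
          rw [List.foldl_cons, stepA_true]
          have hlead : (lead (true :: t) : Int) = (lead t : Int) + 1 := by
            simp [lead, List.takeWhile]
          rw [win3_true_cons, hlead]
          simp only [Bool.or_eq_true, decide_eq_true_eq]
          by_cases hc : c ≤ 1
          · rw [ih (c + 1) (max m (c + 1)) (by omega) (by omega)]
            constructor
            · rintro (hm | hl | hw)
              · rcases le_max_iff.mp hm with h | h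
                · exact Or.inl h
                · exact absurd h (by omega)
              · exact Or.inr (Or.inl (by omega))
              · exact Or.inr (Or.inr (Or.inr hw))
            · rintro (hm | hl | h2 | hw)
              · exact Or.inl (le_trans hm (le_max_left _ _))
              · exact Or.inr (Or.inl (by omega))
              · have : (2 : Int) ≤ (lead t : Int) := by exact_mod_cast h2
                exact Or.inr (Or.inl (by omega))
              · exact Or.inr (Or.inr hw)
          · -- c = 2: the run reaches length 3 right now, both sides hold
            have hL : (3 : Int) ≤ (t.foldl stepA (c + 1, max m (c + 1))).2 := by
              have h1 := loopA_mono t (c + 1) (max m (c + 1))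
              have h2 : c + 1 ≤ max m (c + 1) := le_max_right _ _
              omega
            constructor
            · intro _
              refine Or.inr (Or.inl ?_)
              have : (0 : Int) ≤ (lead t : Int) := by positivity
              omega
            · exact fun _ => hL

lemma anyRange_eq_win3 (fs : List Bool) :
    (List.range (fs.length - 2)).any (fun i =>
      fs.getD i false && fs.getD (i + 1) false && fs.getD (i + 2) false) = win3 fs := by
  induction fs with
  | nil => simp [win3]
  | cons a t ih =>
      match t with
      | [] => simp [win3]
      | [x] => simp [win3]
      | x :: y :: r =>
          have ih' : (List.range r.length).any (fun i =>
              (x :: y :: r).getD i false && (y :: r).getD i false && r.getD i false)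
              = win3 (x :: y :: r) := by
            simpa [List.getD_cons_succ] using ih
          have hlen : (a :: x :: y :: r).length - 2 = r.length + 1 := by simp
          rw [hlen, List.range_succ_eq_map, List.any_cons, List.any_map]
          simp only [Function.comp_def, Nat.succ_eq_add_one, List.getD_cons_succ,
            List.getD_cons_zero]
          rw [ih']
          simp [win3]

-- ===== VERDICT (by name: the statement is the Claim_ definition above) =====
theorem has_poor_grammar_py_spec : Claim_equal_has_poor_grammar_py := by
  intro text _
  unfold Spec_has_poor_grammar_py has_poor_grammar_py has_poor_grammar_py_alt
  simp only []
  rw [anyRange_eq_win3]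
  rw [show (fun (st : Int × Int) w =>
        if wordFlag w = true then (st.1 + 1, max st.2 (st.1 + 1)) else (0, st.2))
      = (fun (st : Int × Int) w => stepA st (wordFlag w)) from rfl]
  rw [← List.foldl_map]
  set fs := (PySem.Str.split₀ text).map wordFlag with hfs
  have hiff : ((fs.foldl stepA (0, 0)).2 ≥ 3) ↔ win3 fs = true := by
    rw [loopA_key fs 0 0 le_rfl (by norm_num)]
    constructor
    · rintro (hm | hl | hw)
      · exact absurd hm (by norm_num)
      · exact lead_win3 fs (by exact_mod_cast (by omega : (3 : Int) ≤ (lead fs : Int)))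
      · exact hw
    · exact fun hw => Or.inr (Or.inr hw)
  cases hb : win3 fs with
  | true => simpa [decide_eq_true_eq] using hiff.mpr hb
  | false =>
      simp only [decide_eq_false_iff_not]
      intro hp
      rw [hiff.mp hp] at hb
      exact absurd hb (by simp)
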